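-- pv_equiv track=rewrite | github.com/Jo-Chang/TIL | kdt2_TIL/week07/day5/Algorithm-Test-04/2200102/11856-반반.py | is_half_half
-- ===== SOURCE A (Python) =====
-- def is_half_half(word: str):
--     '''
--     Description:
--         Judge two alphabet * 2
--
--     Arguments:
--         word`str`: string to judge
--
--     Return:
--         Return "Yes" if there is two alphabet * 2 else "No"
--     '''
--     dict_ = {}
--     for c in word:
--         dict_[c] = dict_.get(c, 0) + 1
--         # Judge word has a alphabet three times
--         if dict_[c] > 2:
--             return "No"
--
--     # Judge word has more than two alphabets
--     if len(dict_) > 2: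
--         return "No"
--     else:
--         return "Yes"
-- ===== SOURCE B (Python) =====
-- def is_half_half(word: str):
--     '''Sort the characters, then decide from adjacent comparisons alone:
--     in the sorted string, more than two distinct characters shows up as
--     more than one adjacent unequal pair, and a character occurring three
--     times shows up as some position equal to the one two places later.
--     No counting table at all.'''
--     s = sorted(word)
--     boundaries = sum(a != b for a, b in zip(s, s[1:]))
--     has_triple = any(a == b for a, b in zip(s, s[2:]))
--     return "Yes" if boundaries <= 1 and not has_triple else "No"
-- ===== Notes on version B (the rewrite author's own statement) =====
-- stated objective: alternative
-- what changed: Replaced A's incremental count-dict loop with early exit by a sort-then-adjacent-scan: sort the characters and decide purely from neighbour comparisons (at most one adjacent unequal pair <=> at most two distinct chars; no position equal to the one two later <=> no char occurs three times), with no counting structure.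
import Mathlib
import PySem

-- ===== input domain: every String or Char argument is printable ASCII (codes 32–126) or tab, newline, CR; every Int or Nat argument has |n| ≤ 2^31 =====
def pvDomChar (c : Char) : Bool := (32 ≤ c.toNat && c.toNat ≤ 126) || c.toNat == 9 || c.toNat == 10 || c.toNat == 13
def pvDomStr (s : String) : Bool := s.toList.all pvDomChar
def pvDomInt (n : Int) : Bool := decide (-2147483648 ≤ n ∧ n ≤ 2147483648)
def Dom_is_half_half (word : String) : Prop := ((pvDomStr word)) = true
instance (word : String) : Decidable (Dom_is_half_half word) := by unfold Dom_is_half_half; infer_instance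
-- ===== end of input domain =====

-- B replaces A's incremental count-dict loop by sort + adjacent-pair comparisons (no counting structure); same return value.

-- ===== PORT A =====
-- A's loop: build a count dict, returning "No" as soon as a character reaches 3;
-- afterwards "No" iff more than two distinct characters.
def goA_is_half_half : List Char → PySem.Dict Char Int → String
  | [], d => if 2 < d.size then "No" else "Yes"
  | c :: cs, d =>
    let d' := d.insert c (d.getD c 0 + 1)
    if 2 < d'.getD c 0 then "No" else goA_is_half_half cs d'

def is_half_half (word : String) : String :=
  goA_is_half_half word.toList PySem.Dict.empty

-- ===== PORT B =====
-- Source B: s = sorted(word); boundaries = sum(a != b for zip(s, s[1:])) (a 0/1 sum = countP;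
-- s[1:] = tail); has_triple = any(a == b for zip(s, s[2:])) (s[2:] = drop 2).
def is_half_half_alt (word : String) : String :=
  let s := PySem.List.sorted word.toList (fun c => c) false
  let boundaries := (s.zip s.tail).countP (fun p => p.1 != p.2)
  let has_triple := (s.zip (s.drop 2)).any (fun p => p.1 == p.2)
  if boundaries ≤ 1 ∧ has_triple = false then "Yes" else "No"

-- ===== PRECONDITION & SPEC =====
def Spec_is_half_half (word : String) (out : String) : Prop := out = is_half_half_alt word
instance (word : String) (out : String) : Decidable (Spec_is_half_half word out) := by unfold Spec_is_half_half; infer_instance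

-- ===== CLAIM (what is proved, stated in full; the proofs are below) =====
def Claim_equal_is_half_half : Prop := ∀ (word : String), Dom_is_half_half word → Spec_is_half_half word (is_half_half word)

-- ===== LEMMAS AND PROOFS =====

lemma keys_insert_eq_add {κ ν : Type} [BEq κ] [LawfulBEq κ] (d : PySem.Dict κ ν) (k : κ) (v : ν) :
    (d.insert k v).keys = PySem.Set.add d.keys k := by
  by_cases h : d.contains k = true
  · rw [PySem.Dict.keys_insert_of_contains _ _ h,
      PySem.Set.add_of_mem ((PySem.Dict.contains_iff_mem_keys _ _).mp h)]
  · rw [PySem.Dict.keys_insert_of_not_contains _ _ (by simpa using h),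
      PySem.Set.add_of_not_mem (fun hm => h ((PySem.Dict.contains_iff_mem_keys _ _).mpr hm))]

-- the invariant of A's loop: with all running counts ≤ 2, it decides the aggregate condition
lemma goA_eq (cs : List Char) (d : PySem.Dict Char Int)
    (hle : ∀ k, d.getD k 0 ≤ 2) :
    goA_is_half_half cs d =
      if (PySem.Set.update d.keys cs).length ≤ 2 ∧
         ∀ c ∈ PySem.Set.update d.keys cs, d.getD c 0 + (cs.count c : Int) ≤ 2
      then "Yes" else "No" := by
  induction cs generalizing d with
  | nil =>
    simp only [goA_is_half_half, PySem.Set.update_nil, List.count_nil]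
    have hsz : d.size = d.keys.length := by
      simp [PySem.Dict.size, PySem.Dict.keys]
    have hall : ∀ c ∈ d.keys, d.getD c 0 + ((0 : Nat) : Int) ≤ 2 := fun c _ => by simpa using hle c
    by_cases hlen : d.keys.length ≤ 2
    · rw [if_neg (by omega), if_pos ⟨hlen, hall⟩]
    · rw [if_pos (by omega), if_neg (by rintro ⟨h1, -⟩; exact hlen h1)]
  | cons c cs ih =>
    simp only [goA_is_half_half]
    rw [PySem.Set.update_cons, ← keys_insert_eq_add d c (d.getD c 0 + 1)]
    have hgc : (d.insert c (d.getD c 0 + 1)).getD c 0 = d.getD c 0 + 1 :=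
      PySem.Dict.getD_insert_self _ _ _ _
    by_cases h : 2 < d.getD c 0 + 1
    · rw [if_pos (by rwa [hgc]), if_neg]
      rintro ⟨-, hall⟩
      have hc : c ∈ PySem.Set.update (d.insert c (d.getD c 0 + 1)).keys cs := by
        rw [PySem.Set.mem_update, keys_insert_eq_add, PySem.Set.mem_add]
        exact Or.inl (Or.inr rfl)
      have := hall c hc
      simp only [List.count_cons_self] at this
      push_cast at this
      omega
    · have hle' : ∀ k, (d.insert c (d.getD c 0 + 1)).getD k 0 ≤ 2 := by
        intro k
        rw [PySem.Dict.getD_insert]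
        split_ifs with hk
        · subst hk; omega
        · exact hle k
      rw [if_neg (by rwa [hgc]), ih _ hle']
      apply if_congr _ rfl rfl
      constructor <;> rintro ⟨h1, h2⟩ <;> refine ⟨h1, fun x hx => ?_⟩
      · have := h2 x hx
        rw [PySem.Dict.getD_insert] at this
        rw [List.count_cons]
        by_cases hxc : x = c
        · subst hxc; simp at this ⊢; omega
        · simp [hxc, Ne.symm hxc] at this ⊢; omega
      · have := h2 x hx
        rw [PySem.Dict.getD_insert]
        rw [List.count_cons] at this
        by_cases hxc : x = c
        · subst hxc; simp at this ⊢; omega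
        · simp [hxc, Ne.symm hxc] at this ⊢; omega

-- in a ≤-sorted list, adjacent unequal pairs + 1 count the distinct elements
lemma boundaries_card (l : List Char) (hs : l.Pairwise (· ≤ ·)) :
    (l.zip l.tail).countP (fun p => p.1 != p.2) + (if l = [] then 0 else 1) = l.toFinset.card := by
  induction l with
  | nil => simp
  | cons a t ih =>
    cases t with
    | nil => simp
    | cons b u =>
      have hab : a ≤ b := (List.pairwise_cons.mp hs).1 b (by simp)
      have hs' : (b :: u).Pairwise (· ≤ ·) := (List.pairwise_cons.mp hs).2
      have hstep : ((a :: b :: u).zip (a :: b :: u).tail).countP (fun p => p.1 != p.2)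
          = (if (a != b) = true then 1 else 0) + ((b :: u).zip (b :: u).tail).countP (fun p => p.1 != p.2) := by
        simp [List.countP_cons]
        omega
      rw [hstep]
      by_cases hab' : a = b
      · subst hab'
        have := ih hs'
        simp only [if_neg (by simp : ¬(a :: u = []))] at this ⊢
        simp only [List.toFinset_cons]
        rw [Finset.insert_idem]
        simpa using this
      · have hnotmem : a ∉ (b :: u) := by
          intro hm
          rcases List.mem_cons.mp hm with h | hm
          · exact hab' h
          · have hbx : b ≤ a := (List.pairwise_cons.mp hs').1 a hm
            exact hab' (le_antisymm hab hbx)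
        have := ih hs'
        rw [if_neg (by simp : ¬(b :: u = []))] at this
        rw [if_neg (by simp : ¬(a :: b :: u = []))]
        simp only [List.toFinset_cons] at *
        rw [Finset.card_insert_of_notMem (by simpa using hnotmem), if_pos (by simp [hab'])]
        omega

-- in a ≤-sorted list, no element equals the one two later ↔ every count ≤ 2
lemma triple_count (l : List Char) (hs : l.Pairwise (· ≤ ·)) :
    ((l.zip (l.drop 2)).any (fun p => p.1 == p.2) = false) ↔ ∀ c, l.count c ≤ 2 := by
  induction l with
  | nil => simp
  | cons a t ih =>
    cases t with
    | nil =>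
      simp only [List.drop_succ_cons, List.drop_nil, List.zip_nil_right, List.any_nil]
      constructor
      · intro _ c
        have := List.count_le_length (l := [a]) (a := c)
        simp at this
        omega
      · intro _; trivial
    | cons b u =>
      cases u with
      | nil =>
        simp only [List.drop_succ_cons, List.drop_nil, List.zip_nil_right, List.any_nil]
        constructor
        · intro _ c
          have := List.count_le_length (l := [a, b]) (a := c)
          simp at this
          omega
        · intro _; trivial
      | cons c v =>
        have hab : a ≤ b := (List.pairwise_cons.mp hs).1 b (by simp)
        have hs' : (b :: c :: v).Pairwise (· ≤ ·) := (List.pairwise_cons.mp hs).2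
        have hbc : b ≤ c := (List.pairwise_cons.mp hs').1 c (by simp)
        have hsc : (c :: v).Pairwise (· ≤ ·) := (List.pairwise_cons.mp hs').2
        have hzip : ((a :: b :: c :: v).zip ((a :: b :: c :: v).drop 2))
            = (a, c) :: ((b :: c :: v).zip ((b :: c :: v).drop 2)) := by
          simp
        rw [hzip]
        simp only [List.any_cons, Bool.or_eq_false_iff, beq_eq_false_iff_ne, ne_eq]
        rw [ih hs']
        constructor
        · rintro ⟨hac, hcnt⟩ x
          by_cases hxa : x = a
          · subst hxa
            have hnc : x ∉ (c :: v) := by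
              intro hm
              have hcx : c ≤ x := by
                rcases List.mem_cons.mp hm with h | hm
                · exact h.symm.le
                · exact (List.pairwise_cons.mp hsc).1 x hm
              exact hac (le_antisymm (le_trans hab hbc) hcx)
            have h0 : (c :: v).count x = 0 := List.count_eq_zero.mpr hnc
            have h1 : (b :: c :: v).count x ≤ 1 := by
              by_cases hxb : x = b
              · subst hxb; rw [List.count_cons_self, h0]
              · rw [List.count_cons_of_ne (Ne.symm hxb), h0]
                omega
            rw [List.count_cons_self]
            omega
          · rw [List.count_cons_of_ne (Ne.symm hxa)]
            exact hcnt x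
        · intro hcnt
          refine ⟨?_, fun x => le_trans List.count_le_count_cons (hcnt x)⟩
          intro hac
          subst hac
          have hba : b = a := le_antisymm hbc hab
          subst hba
          have := hcnt b
          simp at this

-- ===== VERDICT (by name: the statement is the Claim_ definition above) =====
theorem is_half_half_spec : Claim_equal_is_half_half := by
  intro word _
  unfold Spec_is_half_half is_half_half is_half_half_alt
  rw [goA_eq _ _ (fun k => by simp [PySem.Dict.getD_empty])]
  simp only [PySem.Dict.keys_empty, PySem.Set.update_nil_left, PySem.Dict.getD_empty]
  set l := word.toList with hl
  set s := PySem.List.sorted l (fun c => c) false with hsdef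
  have hperm : s.Perm l := PySem.List.sorted_perm _ _ _
  have hsorted : s.Pairwise (· ≤ ·) := by
    simpa using PySem.List.sorted_pairwise (xs := l) (key := fun c => c)
  apply if_congr _ rfl rfl
  have hcard : (PySem.Set.ofList l).length = l.toFinset.card := by
    have hnd : (PySem.Set.ofList l).Nodup := PySem.Set.nodup_ofList l
    have hfs : (PySem.Set.ofList l).toFinset = l.toFinset := by
      ext x
      simp [List.mem_toFinset, PySem.Set.mem_ofList]
    rw [← hfs, List.toFinset_card_of_nodup hnd]
  have hcount : ∀ c, s.count c = l.count c := fun c => hperm.count_eq c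
  have hA : ((PySem.Set.ofList l).length ≤ 2 ∧ ∀ c ∈ PySem.Set.ofList l, (0 : Int) + (l.count c : Int) ≤ 2)
      ↔ (l.toFinset.card ≤ 2 ∧ ∀ c, l.count c ≤ 2) := by
    rw [hcard]
    constructor <;> rintro ⟨h1, h2⟩ <;> refine ⟨h1, ?_⟩
    · intro c
      by_cases hm : c ∈ l
      · have := h2 c ((PySem.Set.mem_ofList _ _).mpr hm)
        omega
      · rw [List.count_eq_zero.mpr hm]; omega
    · intro c _
      have := h2 c
      omega
  rw [hA]
  have hB1 := boundaries_card s hsorted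
  have hB2 := triple_count s hsorted
  have hcard2 : s.toFinset.card = l.toFinset.card := by
    rw [List.toFinset_eq_of_perm _ _ hperm]
  constructor
  · rintro ⟨h1, h2⟩
    constructor
    · rw [hcard2] at hB1
      rcases eq_or_ne s [] with hnil | hnil
      · simp [hnil]
      · rw [if_neg hnil] at hB1
        omega
    · rw [hB2]
      intro x
      rw [hcount]
      exact h2 x
  · rintro ⟨h1, h2⟩
    refine ⟨?_, ?_⟩
    · rw [hcard2] at hB1
      rcases eq_or_ne s [] with hnil | hnil
      · rw [if_pos hnil] at hB1
        omega
      · rw [if_neg hnil] at hB1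
        omega
    · rw [hB2] at h2
      intro x
      rw [← hcount]
      exact h2 x
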